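-- pv_equiv track=rewrite | github.com/junes7/python_algorithm | 프로그래머스/2/138476. 귤 고르기/귤 고르기.py | solution
-- ===== SOURCE A (Python) =====
-- def solution(k, tangerine):
--     # 사이즈 별 귤 개수 딕셔너리화
--     ocnt={}
--     for n in tangerine:
--         ocnt[n]=1 if ocnt.get(n)==None else ocnt[n]+1
--     # 사이즈별 귤 개수 기준으로 내림차순 정렬 및 리스트화
--     ocnt=sorted(ocnt.items(),key=lambda x:x[1],reverse=True)
--     # 가장 빈도가 높은 사이즈의 귤 개수로 count 변수 초기화하고 종류 변수도 1로 초기화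
--     r,cnt=1,ocnt[0][1]
--     # 사이즈별 귤 개수 리스트를 두번째부터 돌면서
--     for i in range(1,len(ocnt)):
--         # 현재 귤개수가 상자에 담으려는 귤의 개수와 같거나 초과일때 루프를 빠져나옵니다.
--         if cnt>=k:
--             break
--         # 현재 귤개수가 상자에 담으려는 귤의 개수보다 작을 때
--         else:
--             # 다음 종류 귤 개수 추가해주고 귤 사이즈 개수도 1증가해줍니다.
--             cnt+=ocnt[i][1]
--             r+=1
--     return r
-- ===== SOURCE B (Python) =====
-- def solution(k, tangerine):
--     # counting-sort over frequencies instead of a comparison sort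
--     freq = {}
--     for n in tangerine:
--         freq[n] = freq.get(n, 0) + 1
--     if not freq:
--         return 0
--     counts = list(freq.values())
--     maxf = max(counts)
--     bucket = [0] * (maxf + 1)
--     for c in counts:
--         bucket[c] += 1
--     total = 0
--     r = 0
--     for f in range(maxf, 0, -1):
--         for _ in range(bucket[f]):
--             total += f
--             r += 1
--             if total >= k:
--                 return r
--     return r
-- ===== Notes on version B (the rewrite author's own statement) =====
-- stated objective: alternative
-- what changed: Replaces A's comparison sort of (size, count) pairs by a counting sort: a bucket table indexed by frequency is built once and scanned from the highest frequency down, accumulating counts until k is reached.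
-- crash fix: On empty tangerine A raises IndexError (ocnt[0][1]); B returns 0, since no tangerine types are needed to fill the box. — e.g. on solution(3, []): A raises IndexError, B returns 0
import Mathlib
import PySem

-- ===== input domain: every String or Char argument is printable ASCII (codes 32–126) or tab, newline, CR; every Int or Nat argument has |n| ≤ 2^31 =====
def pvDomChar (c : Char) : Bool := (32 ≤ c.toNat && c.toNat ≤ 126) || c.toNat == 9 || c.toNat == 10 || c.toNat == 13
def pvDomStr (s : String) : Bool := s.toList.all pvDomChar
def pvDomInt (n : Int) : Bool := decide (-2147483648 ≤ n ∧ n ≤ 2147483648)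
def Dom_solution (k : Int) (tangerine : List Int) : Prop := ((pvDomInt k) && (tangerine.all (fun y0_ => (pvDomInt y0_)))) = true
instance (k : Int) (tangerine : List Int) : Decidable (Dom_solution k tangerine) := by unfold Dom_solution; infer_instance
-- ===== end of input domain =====

-- B replaces A's comparison sort of (size, count) pairs by a counting sort over the
-- frequency values (bucket table indexed by count, scanned from the highest count down).

-- ===== PORT A =====
-- 'for i in range(1, len(ocnt)): if cnt >= k: break; else: cnt += ocnt[i][1]; r += 1'
def loopA (k : Int) : List (Int × Int) → Int → Int → Int
  | [], r, _cnt => r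
  | p :: rest, r, cnt => if cnt ≥ k then r else loopA k rest (r + 1) (cnt + p.2)

def solution (k : Int) (tangerine : List Int) : Int :=
  let ocnt := tangerine.foldl (fun d n =>
      match d.get? n with         -- 'ocnt[n] = 1 if ocnt.get(n)==None else ocnt[n]+1'
      | none => d.insert n 1
      | some v => d.insert n (v + 1)) PySem.Dict.empty
  match PySem.List.sorted ocnt.items (fun x => x.2) true with
  | [] => 0                       -- Python raises IndexError (ocnt[0][1]) here; excluded by Pre_solution
  | p0 :: rest => loopA k rest 1 p0.2

-- ===== PORT B =====
-- 'for _ in range(bucket[f]): total += f; r += 1; if total >= k: return r'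
def innerB (k f : Int) : Nat → Int → Int → Sum Int (Int × Int)
  | 0, total, r => Sum.inr (total, r)
  | n + 1, total, r =>
      if total + f ≥ k then Sum.inl (r + 1) else innerB k f n (total + f) (r + 1)

-- 'for f in range(maxf, 0, -1): …' with the early 'return r' propagated via Sum.inl
def outerB (k : Int) (bucket : List Int) : List Int → Int → Int → Int
  | [], _total, r => r
  | f :: fs, total, r =>
      -- bucket[f]: every f here is in [1, maxf], in range, so pyGetD is exact
      match innerB k f (PySem.List.pyGetD bucket f 0).toNat total r with
      | Sum.inl ans => ans
      | Sum.inr (total', r') => outerB k bucket fs total' r'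

def solution_alt (k : Int) (tangerine : List Int) : Int :=
  let freq := tangerine.foldl (fun d n => d.insert n (d.getD n 0 + 1)) PySem.Dict.empty
  match freq.items with
  | [] => 0                       -- 'if not freq: return 0'
  | _ :: _ =>
    let counts := freq.values
    let maxf := (PySem.List.max? counts (fun x => x)).getD 0  -- counts ≠ [] here, never the default
    -- 'bucket = [0] * (maxf + 1); for c in counts: bucket[c] += 1'  (every c is in [1, maxf], in range)
    let bucket := counts.foldl (fun b c => b.set c.toNat (b.getD c.toNat 0 + 1))
        (List.replicate (maxf + 1).toNat 0)
    outerB k bucket (PySem.List.pyRange maxf 0 (-1)) 0 0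

-- ===== PRECONDITION & SPEC =====
-- Pre_ excludes only the empty list, on which Python A raises IndexError (ocnt[0][1]).
def Pre_solution (k : Int) (tangerine : List Int) : Prop := tangerine ≠ []
instance (k : Int) (tangerine : List Int) : Decidable (Pre_solution k tangerine) := by unfold Pre_solution; infer_instance
def pvWitness_solution : Int × List Int := (4, [1, 2, 2, 3])

-- On empty tangerine A raises IndexError; B returns 0 (no tangerine types are needed).
def Raises_solution (k : Int) (tangerine : List Int) : Prop := tangerine = []
instance (k : Int) (tangerine : List Int) : Decidable (Raises_solution k tangerine) := by unfold Raises_solution; infer_instance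
def pvRaiseWitness_solution : Int × List Int := (3, [])
def pvRaiseWitnessOut_solution : Int := 0

def Spec_solution (k : Int) (tangerine : List Int) (out : Int) : Prop := out = solution_alt k tangerine
instance (k : Int) (tangerine : List Int) (out : Int) : Decidable (Spec_solution k tangerine out) := by unfold Spec_solution; infer_instance

-- ===== CLAIM (what is proved, stated in full; the proofs are below) =====
def Claim_equal_solution : Prop := ∀ (k : Int) (tangerine : List Int), Dom_solution k tangerine → Pre_solution k tangerine → Spec_solution k tangerine (solution k tangerine)
def Claim_raises_solution : Prop := (∀ (k : Int) (tangerine : List Int), Dom_solution k tangerine → Raises_solution k tangerine → ¬ Pre_solution k tangerine) ∧ (Dom_solution (pvRaiseWitness_solution.1) (pvRaiseWitness_solution.2) ∧ Raises_solution (pvRaiseWitness_solution.1) (pvRaiseWitness_solution.2) ∧ solution_alt (pvRaiseWitness_solution.1) (pvRaiseWitness_solution.2) = pvRaiseWitnessOut_solution)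

-- ===== LEMMAS AND PROOFS =====

-- the greedy machine both loops compute: check BEFORE adding (A's shape)
def GA (k : Int) : List Int → Int → Int → Int
  | [], _t, r => r
  | c :: cs, t, r => if t ≥ k then r else GA k cs (t + c) (r + 1)

-- check AFTER adding (B's shape)
def greedy (k : Int) : List Int → Int → Int → Int
  | [], _t, r => r
  | c :: cs, t, r => if t + c ≥ k then r + 1 else greedy k cs (t + c) (r + 1)

theorem foldA_eq_counter (tangerine : List Int) :
    tangerine.foldl (fun d n =>
      match d.get? n with
      | none => d.insert n 1
      | some v => d.insert n (v + 1)) (PySem.Dict.empty : PySem.Dict Int Int) = PySem.Dict.counter tangerine := by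
  have h : (fun (d : PySem.Dict Int Int) (n : Int) =>
      match d.get? n with
      | none => d.insert n 1
      | some v => d.insert n (v + 1)) =
      fun d n => d.insert n (d.getD n 0 + 1) := by
    funext d n
    cases hg : d.get? n with
    | none => simp [PySem.Dict.getD, hg]
    | some v => simp [PySem.Dict.getD, hg]
  rw [h, PySem.Dict.foldl_insert_getD_add_one_eq_counter]

theorem loopA_eq_GA (k : Int) : ∀ (ps : List (Int × Int)) (r cnt : Int),
    loopA k ps r cnt = GA k (ps.map (·.2)) cnt r := by
  intro ps
  induction ps with
  | nil => intro r cnt; rfl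
  | cons p rest ih =>
      intro r cnt
      simp only [loopA, GA, List.map_cons]
      split
      · rfl
      · exact ih (r + 1) (cnt + p.2)

theorem GA_of_ge (k : Int) (cs : List Int) (t r : Int) (h : k ≤ t) : GA k cs t r = r := by
  cases cs with
  | nil => rfl
  | cons c cs => simp only [GA]; rw [if_pos h]

theorem greedy_eq_GA (k : Int) : ∀ (cs : List Int) (t r : Int), t < k →
    greedy k cs t r = GA k cs t r := by
  intro cs
  induction cs with
  | nil => intro t r _; rfl
  | cons c cs ih =>
      intro t r ht
      simp only [greedy, GA]
      rw [if_neg (by omega : ¬ t ≥ k)]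
      by_cases h : t + c ≥ k
      · rw [if_pos h, GA_of_ge k cs _ _ h]
      · rw [if_neg h, ih _ _ (by omega)]

theorem innerB_greedy (k f : Int) : ∀ (n : Nat) (t r : Int) (cs : List Int),
    greedy k (List.replicate n f ++ cs) t r =
      (match innerB k f n t r with
       | Sum.inl a => a
       | Sum.inr (t', r') => greedy k cs t' r') := by
  intro n
  induction n with
  | zero => intro t r cs; rfl
  | succ n ih =>
      intro t r cs
      rw [List.replicate_succ, List.cons_append]
      simp only [greedy, innerB]
      by_cases h : t + f ≥ k
      · rw [if_pos h, if_pos h]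
      · rw [if_neg h, if_neg h, ih]

theorem outerB_greedy (k : Int) (bucket : List Int) : ∀ (fs : List Int) (t r : Int),
    outerB k bucket fs t r =
      greedy k (fs.flatMap (fun f => List.replicate (PySem.List.pyGetD bucket f 0).toNat f)) t r := by
  intro fs
  induction fs with
  | nil => intro t r; rfl
  | cons f fs ih =>
      intro t r
      rw [List.flatMap_cons, innerB_greedy]
      simp only [outerB]
      cases h : innerB k f (PySem.List.pyGetD bucket f 0).toNat t r with
      | inl a => rfl
      | inr p => cases p with | mk t' r' => exact ih t' r'

theorem bucketFold_length (cs : List Int) : ∀ (b : List Int),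
    (cs.foldl (fun b c => b.set c.toNat (b.getD c.toNat 0 + 1)) b).length = b.length := by
  induction cs with
  | nil => intro b; rfl
  | cons c cs ih => intro b; rw [List.foldl_cons, ih, List.length_set]

theorem bucketFold_getD (cs : List Int) : ∀ (b : List Int),
    (∀ c ∈ cs, 0 ≤ c ∧ c.toNat < b.length) → ∀ j : Nat, j < b.length →
    (cs.foldl (fun b c => b.set c.toNat (b.getD c.toNat 0 + 1)) b).getD j 0
      = b.getD j 0 + (cs.count (j : Int) : Int) := by
  induction cs with
  | nil => intro b _ j _; simp
  | cons c cs ih =>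
      intro b hb j hj
      rw [List.foldl_cons]
      have hc := hb c (List.mem_cons_self ..)
      have hlen : (b.set c.toNat (b.getD c.toNat 0 + 1)).length = b.length := List.length_set ..
      rw [ih _ (by intro x hx; rw [hlen]; exact hb x (List.mem_cons_of_mem _ hx)) j (by rw [hlen]; exact hj)]
      rw [List.count_cons]
      by_cases h : c.toNat = j
      · have hcj : (c == (j : Int)) = true := by
          simp only [beq_iff_eq]; omega
        rw [hcj]
        have : (b.set c.toNat (b.getD c.toNat 0 + 1)).getD j 0 = b.getD c.toNat 0 + 1 := by
          subst h
          simp [List.getD, hj]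
        rw [this, h]
        simp
        omega
      · have hcj : (c == (j : Int)) = false := by
          simp only [beq_eq_false_iff_ne, ne_eq]; omega
        rw [hcj]
        have : (b.set c.toNat (b.getD c.toNat 0 + 1)).getD j 0 = b.getD j 0 := by
          simp [List.getD, List.getElem?_set_ne h]
        rw [this]
        simp

theorem flatMap_replicate_count (g : Int → Nat) :
    ∀ (fs : List Int), fs.Nodup → ∀ m : Int,
    (fs.flatMap (fun f => List.replicate (g f) f)).count m = if m ∈ fs then g m else 0 := by
  intro fs
  induction fs with
  | nil => intro _ m; simp
  | cons f fs ih =>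
      intro hnd m
      rw [List.flatMap_cons, List.count_append, List.count_replicate,
        ih hnd.of_cons m]
      by_cases h : m = f
      · subst h
        have hnm : m ∉ fs := (List.nodup_cons.mp hnd).1
        simp [hnm]
      · simp [h, Ne.symm h]

theorem flatMap_replicate_pairwise (g : Int → Nat) :
    ∀ (fs : List Int), fs.Pairwise (fun a b => b < a) →
    (fs.flatMap (fun f => List.replicate (g f) f)).Pairwise (fun a b : Int => b ≤ a) := by
  intro fs
  induction fs with
  | nil => intro _; simp
  | cons f fs ih =>
      intro hp
      rw [List.flatMap_cons, List.pairwise_append]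
      refine ⟨List.pairwise_replicate.mpr (Or.inr le_rfl), ih hp.of_cons, ?_⟩
      intro a ha b hb
      obtain rfl := List.eq_of_mem_replicate ha
      obtain ⟨f', hf', hbf'⟩ := List.mem_flatMap.mp hb
      obtain rfl := List.eq_of_mem_replicate hbf'
      exact le_of_lt (List.rel_of_pairwise_cons hp hf')

theorem solution_eq_alt (k : Int) (tangerine : List Int) (hpre : tangerine ≠ []) :
    (match PySem.List.sorted (PySem.Dict.counter tangerine).items (fun x : Int × Int => x.2) true with
     | [] => (0 : Int)
     | p0 :: rest => loopA k rest 1 p0.2) =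
    (match (PySem.Dict.counter tangerine).items with
     | [] => (0 : Int)
     | _ :: _ =>
       outerB k
         ((PySem.Dict.counter tangerine).values.foldl
           (fun b c => b.set c.toNat (b.getD c.toNat 0 + 1))
           (List.replicate (((PySem.List.max? (PySem.Dict.counter tangerine).values (fun x => x)).getD 0 + 1)).toNat 0))
         (PySem.List.pyRange ((PySem.List.max? (PySem.Dict.counter tangerine).values (fun x => x)).getD 0) 0 (-1)) 0 0) := by
  set C := PySem.Dict.counter tangerine with hC
  have hvals : C.values = C.items.map (·.2) := rfl
  -- items nonempty
  obtain ⟨x, xs, rfl⟩ := List.exists_cons_of_ne_nil hpre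
  have hxmem : x ∈ PySem.Set.ofList (x :: xs) := (PySem.Set.mem_ofList _ _).mpr (List.mem_cons_self ..)
  have hitems_ne : C.items ≠ [] := by
    rw [hC, PySem.Dict.items_counter]
    intro hnil
    rw [List.map_eq_nil_iff] at hnil
    rw [hnil] at hxmem
    exact (List.not_mem_nil) hxmem
  obtain ⟨q, qs, hq⟩ := List.exists_cons_of_ne_nil hitems_ne
  have hs_ne : PySem.List.sorted C.items (fun x : Int × Int => x.2) true ≠ [] := by
    rw [ne_eq, PySem.List.sorted_eq_nil_iff]; exact hitems_ne
  obtain ⟨p0, rest, hs⟩ := List.exists_cons_of_ne_nil hs_ne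
  -- values are positive
  have hv1 : ∀ v ∈ C.values, 1 ≤ v := by
    intro v hv
    rw [hvals, hC, PySem.Dict.items_counter] at hv
    simp only [List.map_map, List.mem_map] at hv
    obtain ⟨y, hy, rfl⟩ := hv
    have : y ∈ (x :: xs) := (PySem.Set.mem_ofList _ _).mp hy
    have : 0 < List.count y (x :: xs) := List.count_pos_iff.mpr this
    simp only [Function.comp]
    omega
  -- max
  have hvals_ne : C.values ≠ [] := by
    rw [hvals, hq]; simp
  obtain ⟨m, hm⟩ : ∃ m, PySem.List.max? C.values (fun x => x) = some m := by
    cases hmx : PySem.List.max? C.values (fun x => x) with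
    | none => exact absurd ((PySem.List.max?_eq_none_iff _ _).mp hmx) hvals_ne
    | some m => exact ⟨m, rfl⟩
  have hvm : ∀ v ∈ C.values, v ≤ m := PySem.List.max?_isMax hm
  have hm1 : 1 ≤ m := hv1 m (PySem.List.max?_mem hm)
  rw [hs, hq, hm]
  dsimp only
  simp only [Option.getD_some]
  -- bucket facts
  set bucket := C.values.foldl (fun b c => b.set c.toNat (b.getD c.toNat 0 + 1))
    (List.replicate (m + 1).toNat (0 : Int)) with hbucket
  have hblen : bucket.length = (m + 1).toNat := by
    rw [hbucket, bucketFold_length, List.length_replicate]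
  have hbval : ∀ f : Int, 0 < f → f ≤ m → PySem.List.pyGetD bucket f 0 = (C.values.count f : Int) := by
    intro f hf0 hfm
    rw [PySem.List.pyGetD_of_nonneg _ _ (by omega)]
    rw [hbucket, bucketFold_getD _ _ ?bnd f.toNat ?rng]
    case bnd =>
      intro c hc
      have := hv1 c hc; have := hvm c hc
      constructor
      · omega
      · rw [List.length_replicate]; omega
    case rng => rw [List.length_replicate]; omega
    have hrep : (List.replicate (m + 1).toNat (0 : Int)).getD f.toNat 0 = 0 := by
      simp [List.getD]
    rw [hrep, Int.toNat_of_nonneg (by omega : (0:Int) ≤ f)]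
    omega
  -- the flattened bucket traversal
  set fs := PySem.List.pyRange m 0 (-1) with hfs
  set F := fs.flatMap (fun f => List.replicate (PySem.List.pyGetD bucket f 0).toNat f) with hF
  have hfsnd : fs.Nodup := by
    rw [hfs, PySem.List.pyRange_neg_one_eq_reverse, List.nodup_reverse]
    exact PySem.List.nodup_pyRange_one _ _
  have hfsp : fs.Pairwise (fun a b => b < a) := by
    rw [hfs, PySem.List.pyRange_neg_one_eq_reverse, List.pairwise_reverse]
    exact PySem.List.pairwise_lt_pyRange_one _ _
  have hFperm : F.Perm C.values := by
    rw [List.perm_iff_count]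
    intro a
    rw [hF, flatMap_replicate_count _ fs hfsnd a]
    by_cases ha : a ∈ fs
    · have hab := (PySem.List.mem_pyRange_neg_one).mp (hfs ▸ ha)
      rw [if_pos ha, hbval a hab.1 hab.2, Int.toNat_natCast]
    · rw [if_neg ha]
      have : a ∉ C.values := by
        intro hav
        exact ha ((hfs ▸ PySem.List.mem_pyRange_neg_one).mpr ⟨by have := hv1 a hav; omega, hvm a hav⟩)
      exact (List.count_eq_zero.mpr this).symm
  have hFpw : F.Pairwise (fun a b : Int => b ≤ a) := flatMap_replicate_pairwise _ fs hfsp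
  -- the sorted-side counts
  have hCApw : (p0.2 :: rest.map (·.2)).Pairwise (fun a b : Int => b ≤ a) := by
    have := PySem.List.sorted_pairwise_rev C.items (fun x : Int × Int => x.2)
    rw [hs] at this
    have h2 := List.Pairwise.map (f := fun p : Int × Int => p.2)
      (S := fun a b : Int => b ≤ a) (fun a b h => h) this
    rwa [List.map_cons] at h2
  have hCAperm : (p0.2 :: rest.map (·.2)).Perm C.values := by
    have := (PySem.List.sorted_perm C.items (fun x : Int × Int => x.2) true).map (·.2)
    rw [hs, List.map_cons] at this
    rw [hvals]
    exact this
  have hFCA : F = p0.2 :: rest.map (·.2) := by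
    exact (hFperm.trans hCAperm.symm).eq_of_pairwise
      (fun a b _ _ h1 h2 => le_antisymm h2 h1) hFpw hCApw
  rw [outerB_greedy, ← hF, hFCA, loopA_eq_GA]
  simp only [greedy, zero_add]
  by_cases hk : p0.2 ≥ k
  · rw [if_pos hk, GA_of_ge _ _ _ _ hk]
  · rw [if_neg hk, greedy_eq_GA _ _ _ _ (by omega)]

-- ===== VERDICT (by name: the statement is the Claim_ definition above) =====
theorem solution_spec : Claim_equal_solution := by
  intro k tangerine _dom hpre
  unfold Spec_solution
  show solution k tangerine = solution_alt k tangerine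
  simp only [solution, solution_alt, foldA_eq_counter,
    PySem.Dict.foldl_insert_getD_add_one_eq_counter]
  exact solution_eq_alt k tangerine hpre

theorem solution_raises : Claim_raises_solution := by
  unfold Claim_raises_solution
  exact ⟨fun k t _ hr hp => hp hr, by decide⟩

-- self-check: B's port indeed returns the stated literal at the raise witness
theorem pvRaiseWitnessOut_solution_ok :
    solution_alt pvRaiseWitness_solution.1 pvRaiseWitness_solution.2 = pvRaiseWitnessOut_solution :=
  solution_raises.2.2.2
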